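-- pv_equiv track=rewrite | github.com/Ivancho894/Python-university-exercises | desafi_3.py | elmodal
-- ===== SOURCE A (Python) =====
-- def elmodal(c):
--     modal,masgrande,igual=0,0,0
--     for posi in range(len(c)):
--         if c[posi]>masgrande:
--             masgrande=c[posi]
--             modal=posi
--
--     for posis in range(len(c)):
--         if c[posis]==masgrande:
--             igual+=1
--     if igual>=2:
--         modal=0
--     return modal
-- ===== SOURCE B (Python) =====
-- def elmodal(c):
--     idx, best, cnt = 0, 0, 0
--     for i, v in enumerate(c):
--         if v > best:
--             idx, best, cnt = i, v, 1
--         elif v == best: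
--             cnt += 1
--     return 0 if cnt >= 2 else idx
-- ===== Notes on version B (the rewrite author's own statement) =====
-- stated objective: alternative
-- what changed: Replaces A's two full scans (one to find the positive max and its first index, a second to count its occurrences) by a single pass that maintains (index, best, count) together, resetting the count to 1 whenever a new strictly larger element appears.
import Mathlib
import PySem

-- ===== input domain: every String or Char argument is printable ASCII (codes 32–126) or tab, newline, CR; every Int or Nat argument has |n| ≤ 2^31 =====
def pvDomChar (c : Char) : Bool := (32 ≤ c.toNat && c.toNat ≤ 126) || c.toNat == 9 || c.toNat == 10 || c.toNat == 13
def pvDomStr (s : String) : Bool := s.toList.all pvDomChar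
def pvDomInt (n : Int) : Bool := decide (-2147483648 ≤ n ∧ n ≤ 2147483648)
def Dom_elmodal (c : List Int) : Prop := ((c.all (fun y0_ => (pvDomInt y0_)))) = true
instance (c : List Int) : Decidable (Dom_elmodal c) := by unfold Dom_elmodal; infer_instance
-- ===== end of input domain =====

-- B replaces A's two full scans by a single pass maintaining (index, best, count) together; same return value.


-- ===== PORT A =====
-- for posi in range(len(c)): if c[posi] > masgrande: … (state (modal, masgrande));
-- then for posis: count equals; if igual >= 2: modal = 0
def elmodal (c : List Int) : Int :=
  let p : Int × Int :=
    (PySem.List.enumerate c).foldl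
      (fun (st : Int × Int) (e : Int × Int) =>
        if e.2 > st.2 then (e.1, e.2) else st) (0, 0)
  let igual : Int :=
    c.foldl (fun (n : Int) (x : Int) => if x = p.2 then n + 1 else n) 0
  if igual ≥ 2 then 0 else p.1

-- ===== PORT B =====
-- one pass over enumerate(c) with state (idx, best, cnt)
def elmodal_alt (c : List Int) : Int :=
  let t : Int × Int × Int :=
    (PySem.List.enumerate c).foldl
      (fun (st : Int × Int × Int) (e : Int × Int) =>
        if e.2 > st.2.1 then (e.1, e.2, 1)
        else if e.2 = st.2.1 then (st.1, st.2.1, st.2.2 + 1)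
        else st) (0, 0, 0)
  if t.2.2 ≥ 2 then 0 else t.1

-- ===== PRECONDITION & SPEC =====
def Spec_elmodal (c : List Int) (out : Int) : Prop := out = elmodal_alt c
instance (c : List Int) (out : Int) : Decidable (Spec_elmodal c out) := by unfold Spec_elmodal; infer_instance

-- ===== CLAIM (what is proved, stated in full; the proofs are below) =====
def Claim_equal_elmodal : Prop := ∀ (c : List Int), Dom_elmodal c → Spec_elmodal c (elmodal c)

-- ===== LEMMAS AND PROOFS =====

-- A's first-loop step and B's step, named for the lemmas
def stepA (st : Int × Int) (e : Int × Int) : Int × Int :=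
  if e.2 > st.2 then (e.1, e.2) else st

def stepB (st : Int × Int × Int) (e : Int × Int) : Int × Int × Int :=
  if e.2 > st.2.1 then (e.1, e.2, 1)
  else if e.2 = st.2.1 then (st.1, st.2.1, st.2.2 + 1)
  else st

-- count of g among the values of l
def cntV : List (Int × Int) → Int → Int
  | [], _ => 0
  | e :: t, g => (if e.2 = g then 1 else 0) + cntV t g

lemma stepA_mono : ∀ (l : List (Int × Int)) (m g : Int), g ≤ (l.foldl stepA (m, g)).2 := by
  intro l
  induction l with
  | nil => intro m g; simp
  | cons e t ih =>
    intro m g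
    simp only [List.foldl_cons, stepA]
    split_ifs with h
    · exact le_trans (le_of_lt h) (ih e.1 e.2)
    · exact ih m g

lemma foldB_inv : ∀ (l : List (Int × Int)) (m g cnt : Int),
    l.foldl stepB (m, g, cnt) =
      ((l.foldl stepA (m, g)).1, (l.foldl stepA (m, g)).2,
        if (l.foldl stepA (m, g)).2 = g then cnt + cntV l g
        else cntV l (l.foldl stepA (m, g)).2) := by
  intro l
  induction l with
  | nil => intro m g cnt; simp [cntV]
  | cons e t ih =>
    intro m g cnt
    obtain ⟨i, v⟩ := e
    simp only [List.foldl_cons, stepB, stepA, cntV]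
    by_cases h1 : v > g
    · simp only [if_pos h1]
      rw [ih i v 1]
      have hge := stepA_mono t i v
      have hne : (t.foldl stepA (i, v)).2 ≠ g := by omega
      by_cases h2 : (t.foldl stepA (i, v)).2 = v
      · simp [h2, if_neg (show ¬ v = g by omega)]
      · simp [h2, hne, show ¬ v = (t.foldl stepA (i, v)).2 by omega]
    · simp only [if_neg h1]
      by_cases h2 : v = g
      · simp only [if_pos h2]
        rw [ih m g (cnt + 1)]
        by_cases h3 : (t.foldl stepA (m, g)).2 = g
        · simp [h3]; omega
        · simp [h3, show ¬ v = (t.foldl stepA (m, g)).2 by omega]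
      · simp only [if_neg h2]
        rw [ih m g cnt]
        have hge := stepA_mono t m g
        by_cases h3 : (t.foldl stepA (m, g)).2 = g
        · simp [h3]
        · simp [h3, show ¬ v = (t.foldl stepA (m, g)).2 by omega]

lemma cntA_eq : ∀ (c : List Int) (n g : Int),
    c.foldl (fun (n : Int) (x : Int) => if x = g then n + 1 else n) n
      = n + cntV (PySem.List.enumerate c) g := by
  intro c
  induction c with
  | nil => intro n g; simp [PySem.List.enumerate_nil, cntV]
  | cons x t ih =>
    intro n g
    have henum : ∀ (s : Int), cntV (PySem.List.enumerate t s) g = cntV (PySem.List.enumerate t) g := by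
      clear ih
      induction t with
      | nil => intro s; simp [PySem.List.enumerate_nil]
      | cons y u ihu =>
        intro s
        simp only [PySem.List.enumerate_cons, cntV]
        rw [ihu (s + 1), ihu (0 + 1)]
    simp only [List.foldl_cons, PySem.List.enumerate_cons, cntV]
    rw [ih, henum (0 + 1)]
    split_ifs with h <;> omega

-- ===== VERDICT (by name: the statement is the Claim_ definition above) =====
theorem elmodal_spec : Claim_equal_elmodal := by
  intro c _
  unfold Spec_elmodal elmodal elmodal_alt
  show (if (c.foldl (fun (n : Int) (x : Int) =>
        if x = ((PySem.List.enumerate c).foldl stepA (0, 0)).2 then n + 1 else n) 0) ≥ 2 then (0 : Int)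
      else ((PySem.List.enumerate c).foldl stepA (0, 0)).1)
    = (if ((PySem.List.enumerate c).foldl stepB (0, 0, 0)).2.2 ≥ 2 then (0 : Int)
      else ((PySem.List.enumerate c).foldl stepB (0, 0, 0)).1)
  rw [foldB_inv, cntA_eq]
  by_cases h : ((PySem.List.enumerate c).foldl stepA (0, 0)).2 = 0
  · simp [h]
  · simp [h]
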